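-- pv_equiv track=rewrite | github.com/HugeChaos/Skinny_10_Round_Zero_Correlation_Distinguish | skinny/main.py | F_2_16_VectorCreat
-- ===== SOURCE A (Python) =====
-- def F_2_16_VectorCreat(W):
--     return [[a0, a1, a2, a3, a4, a5, a6, a7, a8, a9, a10, a11, a12, a13, a14, a15] \
--             for a0 in [0, 1] for a1 in [0, 1] for a2 in [0, 1] for a3 in [0, 1] \
--             for a4 in [0, 1] for a5 in [0, 1] for a6 in [0, 1] for a7 in [0, 1]
--             for a8 in [0, 1] for a9 in [0, 1] for a10 in [0, 1] for a11 in [0, 1] \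
--             for a12 in [0, 1] for a13 in [0, 1] for a14 in [0, 1] for a15 in [0, 1] \
--             if (a0 + a1 + a2 + a3 + a4 + a5 + a6 + a7 + a8 + a9 + a10 + a11 + a12\
--                 + a13 + a14 + a15) in range(1, W + 1)]
-- ===== SOURCE B (Python) =====
-- def F_2_16_VectorCreat(W):
--     out = []
--     for n in range(65536):
--         v = [(n >> (15 - i)) & 1 for i in range(16)]
--         if sum(v) in range(1, W + 1):
--             out.append(v)
--     return out
-- ===== Notes on version B (the rewrite author's own statement) =====
-- stated objective: alternative
-- what changed: Replaces the 16-level nested Cartesian-product comprehension with a single scan of one integer counter over range(65536), extracting the 16 bits of each n (MSB first) and appending the vector when its bit-sum lies in range(1, W+1).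
import Mathlib
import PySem

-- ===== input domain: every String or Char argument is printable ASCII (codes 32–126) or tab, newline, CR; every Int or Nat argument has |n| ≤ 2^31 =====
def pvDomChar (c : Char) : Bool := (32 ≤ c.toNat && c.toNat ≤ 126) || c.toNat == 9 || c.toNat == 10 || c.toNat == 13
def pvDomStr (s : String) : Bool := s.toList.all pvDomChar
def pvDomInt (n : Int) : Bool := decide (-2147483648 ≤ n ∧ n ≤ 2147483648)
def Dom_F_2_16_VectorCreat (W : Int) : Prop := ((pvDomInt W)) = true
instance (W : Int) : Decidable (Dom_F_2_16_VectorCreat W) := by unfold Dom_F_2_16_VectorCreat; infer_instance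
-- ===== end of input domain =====

-- B replaces A's 16-level nested product comprehension with one integer counter over range(65536), extracting each vector's bits from the counter (alternative traversal, same output list and order).


-- ===== PORT A =====
-- Literal port of A's 16-fold nested list comprehension; `s in range(1, W+1)` is membership in pyRange.
def F_2_16_VectorCreat (W : Int) : List (List Int) :=
  [0,1].flatMap fun a0 => [0,1].flatMap fun a1 => [0,1].flatMap fun a2 => [0,1].flatMap fun a3 =>
  [0,1].flatMap fun a4 => [0,1].flatMap fun a5 => [0,1].flatMap fun a6 => [0,1].flatMap fun a7 =>
  [0,1].flatMap fun a8 => [0,1].flatMap fun a9 => [0,1].flatMap fun a10 => [0,1].flatMap fun a11 =>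
  [0,1].flatMap fun a12 => [0,1].flatMap fun a13 => [0,1].flatMap fun a14 => [0,1].flatMap fun a15 =>
  if (a0 + a1 + a2 + a3 + a4 + a5 + a6 + a7 + a8 + a9 + a10 + a11
      + a12 + a13 + a14 + a15) ∈ PySem.List.pyRange 1 (W + 1) 1 then
    [[a0, a1, a2, a3, a4, a5, a6, a7, a8, a9, a10, a11, a12, a13, a14, a15]]
  else []

-- ===== PORT B =====
-- B iterates one counter n over range(65536) and extracts the 16 bits of n, MSB first.
-- `n >> (15 - i)` : the shift count 15 - i is nonnegative for i in range(16), so `.toNat` is exact.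
def pvBits (n : Int) : List Int :=
  (PySem.List.pyRange 0 16 1).map fun i => PySem.Int.band (n >>> (15 - i).toNat) 1

def F_2_16_VectorCreat_alt (W : Int) : List (List Int) :=
  (PySem.List.pyRange 0 65536 1).foldl
    (fun out n =>
      let v := pvBits n
      if v.sum ∈ PySem.List.pyRange 1 (W + 1) 1 then out ++ [v] else out)
    []

-- ===== PRECONDITION & SPEC =====
def Spec_F_2_16_VectorCreat (W : Int) (out : List (List Int)) : Prop := out = F_2_16_VectorCreat_alt W
instance (W : Int) (out : List (List Int)) : Decidable (Spec_F_2_16_VectorCreat W out) := by unfold Spec_F_2_16_VectorCreat; infer_instance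

-- ===== CLAIM (what is proved, stated in full; the proofs are below) =====
def Claim_equal_F_2_16_VectorCreat : Prop := ∀ (W : Int), Dom_F_2_16_VectorCreat W → Spec_F_2_16_VectorCreat W (F_2_16_VectorCreat W)

-- ===== LEMMAS AND PROOFS =====

-- MSB-first k-bit vector of a natural number, as the Int list the ports produce.
def pvBitsN (k m : Nat) : List Int :=
  (List.range k).map fun i => (((m >>> (k - 1 - i)) % 2 : Nat) : Int)

-- all k-bit vectors, MSB varying slowest (the order of A's nested loops)
def pvEnum : Nat → List (List Int)
  | 0 => [[]]
  | k + 1 => [0,1].flatMap fun b => (pvEnum k).map (b :: ·)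

lemma pvBitsN_succ_low (k m : Nat) (h : m < 2 ^ k) :
    pvBitsN (k + 1) m = 0 :: pvBitsN k m := by
  unfold pvBitsN
  rw [List.range_succ_eq_map]
  simp only [List.map_cons, List.map_map, Function.comp_def]
  refine congrArg₂ _ ?_ (List.map_congr_left ?_)
  · have hk : k + 1 - 1 - 0 = k := by omega
    have h0 : (m >>> k) % 2 = 0 := by
      rw [Nat.shiftRight_eq_div_pow]
      simp [Nat.div_eq_of_lt h]
    rw [hk, h0, Nat.cast_zero]
  · intro i _
    have : k + 1 - 1 - (i + 1) = k - 1 - i := by omega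
    rw [this]

lemma pvBitsN_succ_high (k m : Nat) (h : m < 2 ^ k) :
    pvBitsN (k + 1) (2 ^ k + m) = 1 :: pvBitsN k m := by
  unfold pvBitsN
  rw [List.range_succ_eq_map]
  simp only [List.map_cons, List.map_map, Function.comp_def]
  refine congrArg₂ _ ?_ (List.map_congr_left ?_)
  · have hd : (2 ^ k + m) / 2 ^ k = 1 := by
      rw [Nat.add_comm, Nat.add_div_right _ (Nat.two_pow_pos k)]
      simp [Nat.div_eq_of_lt h]
    have hk : k + 1 - 1 - 0 = k := by omega
    have h0 : ((2 ^ k + m) >>> k) % 2 = 1 := by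
      rw [Nat.shiftRight_eq_div_pow]
      simp [hd]
    rw [hk, h0, Nat.cast_one]
  · intro i hi
    have hi' : i < k := List.mem_range.mp hi
    have hidx : k + 1 - 1 - (i + 1) = k - 1 - i := by omega
    rw [hidx]
    have hj : k - 1 - i < k := by omega
    set j := k - 1 - i with hjdef
    rw [Nat.shiftRight_eq_div_pow, Nat.shiftRight_eq_div_pow]
    have hsplit : 2 ^ k = 2 ^ (k - j - 1) * 2 * 2 ^ j := by
      rw [mul_assoc, ← pow_succ']
      rw [← pow_add]
      congr 1
      omega
    rw [hsplit, Nat.add_comm, Nat.add_mul_div_right _ _ (Nat.two_pow_pos j)]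
    congr 1
    omega

lemma pvEnum_eq_map_range (k : Nat) :
    pvEnum k = (List.range (2 ^ k)).map (pvBitsN k) := by
  induction k with
  | zero => simp [pvEnum, pvBitsN]
  | succ k ih =>
      rw [pvEnum, ih, pow_succ, mul_two, List.range_add]
      simp only [List.flatMap_cons, List.flatMap_nil, List.append_nil, List.map_map,
        List.map_append]
      congr 1
      · exact List.map_congr_left fun m hm =>
          ((pvBitsN_succ_low k m (List.mem_range.mp hm)).symm)
      · exact List.map_congr_left fun m hm => by
          simpa [Function.comp] using (pvBitsN_succ_high k m (List.mem_range.mp hm)).symm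

lemma pvBits_natCast (m : Nat) : pvBits (m : Int) = pvBitsN 16 m := by
  unfold pvBits pvBitsN
  rw [show (16 : Int) = ((16 : Nat) : Int) from rfl, PySem.List.pyRange_zero_nat, List.map_map]
  refine List.map_congr_left fun i hi => ?_
  have hi' : i < 16 := List.mem_range.mp hi
  have ht : ((15 : Int) - (i : Int)).toNat = 15 - i := by omega
  simp only [Function.comp_def, ht]
  rw [Int.shiftRight_natCast, PySem.Int.band_one, PySem.Int.mod_eq_emod_of_pos (by norm_num)]
  have h16 : 16 - 1 - i = 15 - i := by omega
  rw [h16]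
  exact_mod_cast rfl

lemma pvBits_pyRange : (PySem.List.pyRange 0 65536 1).map pvBits = pvEnum 16 := by
  rw [pvEnum_eq_map_range]
  rw [show (65536 : Int) = ((65536 : Nat) : Int) from rfl, PySem.List.pyRange_zero_nat,
    List.map_map]
  exact List.map_congr_left fun m _ => pvBits_natCast m

-- ===== VERDICT (by name: the statement is the Claim_ definition above) =====
theorem F_2_16_VectorCreat_spec : Claim_equal_F_2_16_VectorCreat := by
  intro W _
  unfold Spec_F_2_16_VectorCreat F_2_16_VectorCreat F_2_16_VectorCreat_alt
  rw [PySem.List.foldl_append_ite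
    (p := fun n => (pvBits n).sum ∈ PySem.List.pyRange 1 (W + 1) 1) (f := pvBits),
    List.nil_append]
  have hswap : ((PySem.List.pyRange 0 65536 1).filter
        (fun n => decide ((pvBits n).sum ∈ PySem.List.pyRange 1 (W + 1) 1))).map pvBits
      = ((PySem.List.pyRange 0 65536 1).map pvBits).filter
        (fun v => decide (v.sum ∈ PySem.List.pyRange 1 (W + 1) 1)) := by
    rw [List.filter_map]; rfl
  rw [hswap, pvBits_pyRange]
  simp only [pvEnum, List.filter_flatMap, List.filter_cons, List.filter_nil,
    List.sum_cons, List.sum_nil, add_zero, add_assoc, decide_eq_true_eq,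
    List.map_cons, List.map_nil, List.map_flatMap]
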